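-- pv_equiv track=rewrite | github.com/tpopordanoska/explanatory-guided-learning | src/optimal_user.py | create_lookup
-- ===== SOURCE A (Python) =====
-- def create_lookup(points, clusters_lookup):
--     """
--     Returns dictionary which has as keys the keys from the cluster_lookup, and the values are the wrong points in the
--     corresponding cluster
--
--     :param points: The data
--     :param clusters_lookup: The lookup for the clusters
--
--     :return: The lookup for the wrong points
--     """
--     lookup = {}
--     for point in points:
--         for key, value in clusters_lookup.items():
--             if point in value:
--                 if key not in lookup:
--                     lookup[key] = [point]
--                     break
--                 else:
--                     lookup[key].append(point)
--                     break
--     return lookup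
-- ===== SOURCE B (Python) =====
-- def create_lookup(points, clusters_lookup):
--     # Invert the cluster lookup once: point -> first cluster key containing it,
--     # then assign each point with a single dict lookup (no inner scan per point).
--     idx = {}
--     for key, value in clusters_lookup.items():
--         for p in value:
--             if p not in idx:
--                 idx[p] = key
--     lookup = {}
--     for p in points:
--         key = idx.get(p)
--         if key is not None:
--             lookup.setdefault(key, []).append(p)
--     return lookup
-- ===== Notes on version B (the rewrite author's own statement) =====
-- stated objective: faster
-- what changed: Builds an inverted point-to-first-cluster-key index once, then assigns each point with a single O(1) dict lookup instead of scanning every cluster's value list per point.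
import Mathlib
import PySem

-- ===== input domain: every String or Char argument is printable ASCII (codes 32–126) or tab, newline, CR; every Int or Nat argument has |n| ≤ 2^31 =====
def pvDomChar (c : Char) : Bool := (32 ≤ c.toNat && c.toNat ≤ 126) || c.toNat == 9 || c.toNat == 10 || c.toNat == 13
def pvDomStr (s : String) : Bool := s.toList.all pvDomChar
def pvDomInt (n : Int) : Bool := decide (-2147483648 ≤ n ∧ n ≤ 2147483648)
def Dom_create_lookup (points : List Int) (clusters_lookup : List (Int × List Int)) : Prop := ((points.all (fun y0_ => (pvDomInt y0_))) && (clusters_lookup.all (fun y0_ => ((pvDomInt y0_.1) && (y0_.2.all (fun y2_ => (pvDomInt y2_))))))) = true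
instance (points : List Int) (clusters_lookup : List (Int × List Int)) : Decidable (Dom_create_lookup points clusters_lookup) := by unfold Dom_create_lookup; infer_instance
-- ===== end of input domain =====

-- B replaces A's per-point scan over all clusters by a precomputed inverted
-- point→first-cluster-key index and a single pass over the points (faster, asymptotic).


-- association-list primitives shared by both ports (Python dict get / in / value mutation)
def aget? {α : Type} : List (Int × α) → Int → Option α
  | [], _ => none
  | (k, v) :: r, x => if k = x then some v else aget? r x

def amodify {α : Type} : List (Int × α) → Int → (α → α) → List (Int × α)
  | [], _, _ => []
  | (k, v) :: r, x, f => if k = x then (k, f v) :: r else (k, v) :: amodify r x f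

-- ===== PORT A =====
-- inner 'for key, value in clusters_lookup.items(): … break' loop of A
def scanA (lookup : List (Int × List Int)) (point : Int) :
    List (Int × List Int) → List (Int × List Int)
  | [] => lookup
  | (key, value) :: rest =>
    if point ∈ value then
      if aget? lookup key = none then lookup ++ [(key, [point])]
      else amodify lookup key (fun l => l ++ [point])
    else scanA lookup point rest

def create_lookup (points : List Int) (clusters_lookup : List (Int × List Int)) : List (Int × List Int) :=
  points.foldl (fun lookup point => scanA lookup point clusters_lookup) []

-- ===== PORT B =====
-- 'idx' building: for key, value in clusters_lookup.items(): for p in value: if p not in idx: idx[p] = key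
def buildIdx (clusters_lookup : List (Int × List Int)) : List (Int × Int) :=
  clusters_lookup.foldl
    (fun idx kv => kv.2.foldl
      (fun idx p => if (aget? idx p).isSome then idx else idx ++ [(p, kv.1)]) idx) []

def create_lookup_alt (points : List Int) (clusters_lookup : List (Int × List Int)) : List (Int × List Int) :=
  let idx := buildIdx clusters_lookup
  points.foldl
    (fun lookup p =>
      match aget? idx p with
      | none => lookup
      | some key =>
        -- lookup.setdefault(key, []).append(p)
        if (aget? lookup key).isSome then amodify lookup key (fun l => l ++ [p])
        else lookup ++ [(key, [p])]) []

-- ===== PRECONDITION & SPEC =====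
def Spec_create_lookup (points : List Int) (clusters_lookup : List (Int × List Int)) (out : List (Int × List Int)) : Prop := out = create_lookup_alt points clusters_lookup
instance (points : List Int) (clusters_lookup : List (Int × List Int)) (out : List (Int × List Int)) : Decidable (Spec_create_lookup points clusters_lookup out) := by unfold Spec_create_lookup; infer_instance

-- ===== CLAIM (what is proved, stated in full; the proofs are below) =====
def Claim_equal_create_lookup : Prop := ∀ (points : List Int) (clusters_lookup : List (Int × List Int)), Dom_create_lookup points clusters_lookup → Spec_create_lookup points clusters_lookup (create_lookup points clusters_lookup)

-- ===== LEMMAS AND PROOFS =====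

-- first cluster key (in iteration order) whose value list contains p
def firstKey : List (Int × List Int) → Int → Option Int
  | [], _ => none
  | (k, v) :: r, p => if p ∈ v then some k else firstKey r p

theorem scanA_eq_firstKey (point : Int) (cl : List (Int × List Int))
    (lookup : List (Int × List Int)) :
    scanA lookup point cl =
      match firstKey cl point with
      | none => lookup
      | some key =>
        if (aget? lookup key).isSome then amodify lookup key (fun l => l ++ [point])
        else lookup ++ [(key, [point])] := by
  induction cl with
  | nil => rfl
  | cons kv r ih =>
    obtain ⟨k, v⟩ := kv
    by_cases h : point ∈ v
    · simp [scanA, firstKey, h, Option.isSome]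
      cases aget? lookup k <;> simp
    · simp [scanA, firstKey, h, ih]

theorem aget?_append {α : Type} (l : List (Int × α)) (q : Int) (a : α) (p : Int) :
    aget? (l ++ [(q, a)]) p = ((aget? l p).orElse (fun _ => if q = p then some a else none)) := by
  induction l with
  | nil => simp [aget?]
  | cons kv r ih =>
    obtain ⟨k, v⟩ := kv
    by_cases h : k = p <;> simp [aget?, h, ih]

theorem innerIdx_get (k : Int) (v : List Int) (p : Int) :
    ∀ idx0 : List (Int × Int),
      aget? (v.foldl (fun idx q => if (aget? idx q).isSome then idx else idx ++ [(q, k)]) idx0) p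
        = ((aget? idx0 p).orElse (fun _ => if p ∈ v then some k else none)) := by
  induction v with
  | nil => intro idx0; simp [List.foldl]
  | cons q rest ih =>
    intro idx0
    simp only [List.foldl, List.mem_cons]
    rw [ih]
    by_cases hq : (aget? idx0 q).isSome
    · rw [if_pos hq]
      cases hpq : aget? idx0 p with
      | some a => simp [Option.orElse]
      | none =>
        by_cases h1 : p = q
        · subst h1; rw [hpq] at hq; simp at hq
        · simp [Option.orElse, h1]
    · rw [if_neg hq, aget?_append]
      cases hpq : aget? idx0 p with
      | some a => simp [Option.orElse]
      | none =>
        by_cases h1 : p = q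
        · subst h1; simp [Option.orElse]
        · have h2 : ¬ q = p := fun h => h1 h.symm
          simp [Option.orElse, h1, h2]

theorem buildIdx_get_aux (cl : List (Int × List Int)) (p : Int) :
    ∀ idx0 : List (Int × Int),
      aget? (cl.foldl (fun idx kv => kv.2.foldl
            (fun idx q => if (aget? idx q).isSome then idx else idx ++ [(q, kv.1)]) idx) idx0) p
        = ((aget? idx0 p).orElse (fun _ => firstKey cl p)) := by
  induction cl with
  | nil => intro idx0; simp [List.foldl, firstKey]
  | cons kv r ih =>
    intro idx0
    obtain ⟨k, v⟩ := kv
    simp only [List.foldl]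
    rw [ih, innerIdx_get]
    cases hpq : aget? idx0 p with
    | some a => simp [Option.orElse]
    | none =>
      by_cases hv : p ∈ v <;> simp [Option.orElse, hv, firstKey]

theorem buildIdx_get (cl : List (Int × List Int)) (p : Int) :
    aget? (buildIdx cl) p = firstKey cl p := by
  unfold buildIdx
  rw [buildIdx_get_aux]
  simp [aget?, Option.orElse]

-- ===== VERDICT (by name: the statement is the Claim_ definition above) =====
theorem create_lookup_spec : Claim_equal_create_lookup := by
  intro points clusters_lookup _
  unfold Spec_create_lookup create_lookup create_lookup_alt
  apply PySem.List.foldl_congr_mem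
  intro lookup a _
  rw [scanA_eq_firstKey, ← buildIdx_get]
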